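-- pv_equiv track=rewrite | github.com/linhdvu14/cp-sols | sols/CodeForces/1660_d3/E_Matrix_and_Shifts.py | solve
-- ===== SOURCE A (Python) =====
-- def solve(N, A):
--     all_ones = sum(sum(row) for row in A)
--     res = N * N
--
--     for c in range(N):
--         diag_ones = r = 0
--         for _ in range(N):
--             diag_ones += A[r][c]
--             r = (r + 1) % N
--             c = (c + 1) % N
--         res = min(res, N + all_ones - 2 * diag_ones)
--
--     return res
-- ===== SOURCE B (Python) =====
-- def solve(N, A):
--     total = sum(sum(row) for row in A)
--     diag = [0] * N
--     for r in range(N):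
--         for c in range(N):
--             diag[(c - r) % N] += A[r][c]
--     res = N * N
--     for d in range(N):
--         res = min(res, N + total - 2 * diag[d])
--     return res
-- ===== Notes on version B (the rewrite author's own statement) =====
-- stated objective: alternative
-- what changed: Instead of re-walking each wrapped diagonal with two wrapping counters (N separate diagonal walks), B makes one row-major pass binning every cell A[r][c] into diag[(c-r)%N], then takes the minimum over the N bins.
import Mathlib
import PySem

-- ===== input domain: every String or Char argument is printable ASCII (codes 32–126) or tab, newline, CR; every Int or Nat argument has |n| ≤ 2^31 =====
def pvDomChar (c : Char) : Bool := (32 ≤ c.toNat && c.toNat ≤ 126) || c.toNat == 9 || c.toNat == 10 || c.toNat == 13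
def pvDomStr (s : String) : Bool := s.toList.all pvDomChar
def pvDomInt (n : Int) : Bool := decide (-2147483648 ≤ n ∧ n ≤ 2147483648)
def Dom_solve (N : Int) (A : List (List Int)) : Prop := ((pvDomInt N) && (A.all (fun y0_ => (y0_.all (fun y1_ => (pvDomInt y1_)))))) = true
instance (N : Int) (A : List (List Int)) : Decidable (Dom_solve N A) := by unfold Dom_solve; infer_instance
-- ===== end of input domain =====

-- B replaces A's N separate wrapping diagonal walks by one row-major pass that bins
-- each cell into its wrapped diagonal; same O(N^2) cost, different traversal (objective: alternative).

-- A[r][c]; the defaults are never reached under Pre_solve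
def get2 (A : List (List Int)) (r c : Int) : Int :=
  (PySem.List.pyGet? ((PySem.List.pyGet? A r).getD []) c).getD 0

-- ===== PORT A =====
-- inner 'for _ in range(N)' loop of A, state (diag_ones, r, c)
def solveInner (A : List (List Int)) (N : Int) : Nat → Int → Int → Int → Int
  | 0, diag, _, _ => diag
  | Nat.succ k, diag, r, c =>
      solveInner A N k (diag + get2 A r c) (PySem.Int.mod (r + 1) N) (PySem.Int.mod (c + 1) N)

def solve (N : Int) (A : List (List Int)) : Int :=
  let all_ones := (A.map (fun row => row.foldl (· + ·) 0)).foldl (· + ·) 0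
  (List.range N.toNat).foldl
    (fun res c => min res (N + all_ones - 2 * solveInner A N N.toNat 0 0 (Int.ofNat c)))
    (N * N)

-- ===== PORT B =====
def solve_alt (N : Int) (A : List (List Int)) : Int :=
  let total := (A.map (fun row => row.foldl (· + ·) 0)).foldl (· + ·) 0
  let diag :=
    (List.range N.toNat).foldl
      (fun dg (r : Nat) =>
        (List.range N.toNat).foldl
          -- diag[(c - r) % N] += A[r][c]; the index is in [0, N) so .toNat is exact
          (fun dg (c : Nat) =>
            dg.set (PySem.Int.mod ((c : Int) - (r : Int)) N).toNat
              (dg.getD (PySem.Int.mod ((c : Int) - (r : Int)) N).toNat 0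
                + get2 A (r : Int) (c : Int)))
          dg)
      (List.replicate N.toNat 0)
  (List.range N.toNat).foldl
    (fun res d => min res (N + total - 2 * diag.getD d 0))
    (N * N)

-- ===== PRECONDITION & SPEC =====
-- Pre_ excludes exactly the inputs where A (and B alike) raises IndexError:
-- 0 < N but A has fewer than N rows or one of the first N rows has fewer than N entries.
def Pre_solve (N : Int) (A : List (List Int)) : Prop :=
  0 < N → (N ≤ (A.length : Int) ∧ ∀ row ∈ A.take N.toNat, N ≤ (row.length : Int))
instance (N : Int) (A : List (List Int)) : Decidable (Pre_solve N A) := by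
  unfold Pre_solve; infer_instance

def pvWitness_solve : Int × List (List Int) := (2, [[1, 0], [0, 1]])

def Spec_solve (N : Int) (A : List (List Int)) (out : Int) : Prop := out = solve_alt N A
instance (N : Int) (A : List (List Int)) (out : Int) : Decidable (Spec_solve N A out) := by
  unfold Spec_solve; infer_instance

-- ===== CLAIM (what is proved, stated in full; the proofs are below) =====
def Claim_equal_solve : Prop :=
  ∀ (N : Int) (A : List (List Int)), Dom_solve N A → Pre_solve N A → Spec_solve N A (solve N A)

-- ===== LEMMAS AND PROOFS =====

-- A's inner walk as a closed sum, for reduced starting state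
lemma solveInner_eq (A : List (List Int)) (N : Int) (hN : 0 < N) :
    ∀ (k : Nat) (diag r c : Int), r % N = r → c % N = c →
      solveInner A N k diag r c
        = diag + ∑ j ∈ Finset.range k, get2 A ((r + j) % N) ((c + j) % N) := by
  intro k
  induction k with
  | zero => intro diag r c _ _; simp [solveInner]
  | succ k ih =>
    intro diag r c hr hc
    have hmod : PySem.Int.mod (r + 1) N = (r + 1) % N := PySem.Int.mod_eq_emod_of_pos hN
    have hmod' : PySem.Int.mod (c + 1) N = (c + 1) % N := PySem.Int.mod_eq_emod_of_pos hN
    have hred : ((r + 1) % N) % N = (r + 1) % N := Int.emod_emod_of_dvd _ dvd_rfl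
    have hred' : ((c + 1) % N) % N = (c + 1) % N := Int.emod_emod_of_dvd _ dvd_rfl
    have step : solveInner A N (k + 1) diag r c
        = solveInner A N k (diag + get2 A r c) ((r + 1) % N) ((c + 1) % N) := by
      simp [solveInner, hmod, hmod']
    rw [step, ih _ _ _ hred hred']
    have hsh : ∀ (x : Int) (j : Nat), ((x + 1) % N + (j : Int)) % N = (x + ((j : Int) + 1)) % N := by
      intro x j
      have h2 : Int.ModEq N ((x + 1) % N) (x + 1) := Int.emod_emod_of_dvd _ dvd_rfl
      have h3 := h2.add_right (j : Int)
      calc ((x + 1) % N + (j : Int)) % N = (x + 1 + (j : Int)) % N := h3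
        _ = (x + ((j : Int) + 1)) % N := by ring_nf
    have hcong : (∑ j ∈ Finset.range k, get2 A (((r + 1) % N + j) % N) (((c + 1) % N + j) % N))
        = ∑ j ∈ Finset.range k, get2 A ((r + ((j : Nat) + 1 : Nat)) % N) ((c + ((j : Nat) + 1 : Nat)) % N) := by
      refine Finset.sum_congr rfl fun j _ => ?_
      rw [hsh r j, hsh c j]
      norm_cast
    rw [hcong, Finset.sum_range_succ']
    simp only [Nat.cast_zero, add_zero, hr, hc]
    push_cast
    ring

-- the canonical diagonal sum
def diagSum (A : List (List Int)) (N : Int) (d : Int) : Int :=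
  ∑ j ∈ Finset.range N.toNat, get2 A (j : Int) ((d + j) % N)

-- set/getD bump fold: length preserved
lemma foldl_bump_length (L : List Nat) (idx : Nat → Nat) (v : Nat → Int) :
    ∀ dg : List Int,
      (L.foldl (fun dg c => dg.set (idx c) (dg.getD (idx c) 0 + v c)) dg).length = dg.length := by
  induction L with
  | nil => intro dg; rfl
  | cons c L ih => intro dg; rw [List.foldl_cons, ih, List.length_set]

-- set/getD bump fold: pointwise value
lemma foldl_bump_getD (idx : Nat → Nat) (v : Nat → Int) (d : Nat) :
    ∀ (L : List Nat) (dg : List Int), d < dg.length → (∀ c ∈ L, idx c < dg.length) →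
      (L.foldl (fun dg c => dg.set (idx c) (dg.getD (idx c) 0 + v c)) dg).getD d 0
        = dg.getD d 0 + ((L.filter fun c => idx c == d).map v).sum := by
  intro L
  induction L with
  | nil => intro dg _ _; simp
  | cons c L ih =>
    intro dg hd hall
    have hc : idx c < dg.length := hall c (by simp)
    have hlen : (dg.set (idx c) (dg.getD (idx c) 0 + v c)).length = dg.length := by simp
    rw [List.foldl_cons, ih _ (by rw [hlen]; exact hd)
      (by intro x hx; rw [hlen]; exact hall x (by simp [hx]))]
    by_cases h : idx c = d
    · subst h
      have hset : (dg.set (idx c) (dg.getD (idx c) 0 + v c)).getD (idx c) 0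
          = dg.getD (idx c) 0 + v c := by
        simp [List.getD_eq_getElem?_getD, hc]
      rw [hset]
      simp
      ring
    · have hset : (dg.set (idx c) (dg.getD (idx c) 0 + v c)).getD d 0 = dg.getD d 0 := by
        simp [List.getD_eq_getElem?_getD, List.getElem?_set_ne h]
      rw [hset]
      simp [h]

-- filter of range by a predicate true at exactly one point
lemma filter_range_eq_singleton (p : Nat → Bool) :
    ∀ (n c0 : Nat), c0 < n → (∀ c < n, p c = true ↔ c = c0) →
      (List.range n).filter p = [c0] := by
  intro n
  induction n with
  | zero => intro c0 h; omega
  | succ n ih =>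
    intro c0 hlt hp
    rw [List.range_succ, List.filter_append]
    by_cases h : c0 = n
    · subst h
      have hnil : (List.range c0).filter p = [] := by
        rw [List.filter_eq_nil_iff]
        intro a ha
        simp only [List.mem_range] at ha
        intro hpa
        have := (hp a (by omega)).mp hpa
        omega
      simp [hnil, (hp c0 (by omega)).mpr rfl]
    · have h1 : (List.range n).filter p = [c0] :=
        ih c0 (by omega) (fun c hc => hp c (by omega))
      have h2 : p n = false := by
        by_contra hf
        have hpn : p n = true := by revert hf; cases p n <;> simp
        have := (hp n (by omega)).mp hpn
        omega
      simp [h1, h2]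

-- the unique column hitting bin d in row r
lemma idx_eq_iff (N r d : Int) (hd : 0 ≤ d) (hdN : d < N)
    (c : Int) (hc : 0 ≤ c) (hcN : c < N) :
    ((c - r) % N = d ↔ c = (d + r) % N) := by
  constructor
  · intro h
    have h1 : (c - r) % N = d % N := by rw [h, Int.emod_eq_of_lt hd hdN]
    have h2 : (c - r + r) % N = (d + r) % N := Int.ModEq.add_right r h1
    have h3 : c - r + r = c := by ring
    rw [h3, Int.emod_eq_of_lt hc hcN] at h2
    exact h2
  · intro h
    subst h
    have h2 : Int.ModEq N ((d + r) % N) (d + r) := Int.emod_emod_of_dvd _ dvd_rfl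
    have h3 : ((d + r) % N - r) % N = (d + r - r) % N := h2.sub_right r
    have h4 : d + r - r = d := by ring
    rw [h4, Int.emod_eq_of_lt hd hdN] at h3
    exact h3

-- per-row bin update (the inner c-loop of solve_alt, one row r)
def bumpRow (A : List (List Int)) (N : Int) (r : Nat) (dg : List Int) : List Int :=
  (List.range N.toNat).foldl
    (fun dg (c : Nat) =>
      dg.set (PySem.Int.mod ((c : Int) - (r : Int)) N).toNat
        (dg.getD (PySem.Int.mod ((c : Int) - (r : Int)) N).toNat 0
          + get2 A (r : Int) (c : Int)))
    dg

lemma bumpRow_length (A : List (List Int)) (N : Int) (r : Nat) (dg : List Int) :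
    (bumpRow A N r dg).length = dg.length := by
  unfold bumpRow
  exact foldl_bump_length (List.range N.toNat)
    (fun c => (PySem.Int.mod ((c : Int) - (r : Int)) N).toNat)
    (fun c => get2 A (r : Int) (c : Int)) dg

lemma bumpRow_getD (A : List (List Int)) (N : Int) (hN : 0 < N) (r d : Nat)
    (hd : d < N.toNat) (dg : List Int) (hlen : dg.length = N.toNat) :
    (bumpRow A N r dg).getD d 0
      = dg.getD d 0 + get2 A (r : Int) (((d : Int) + (r : Int)) % N) := by
  have hmodeq : ∀ c : Nat, PySem.Int.mod ((c : Int) - (r : Int)) N = ((c : Int) - (r : Int)) % N :=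
    fun c => PySem.Int.mod_eq_emod_of_pos hN
  have hc0nn : 0 ≤ ((d : Int) + (r : Int)) % N := Int.emod_nonneg _ (by omega)
  have hc0lt : ((d : Int) + (r : Int)) % N < N := Int.emod_lt_of_pos _ hN
  have hidx : ∀ c : Nat, (PySem.Int.mod ((c : Int) - (r : Int)) N).toNat < dg.length := by
    intro c
    rw [hmodeq c, hlen]
    have h1 := Int.emod_nonneg ((c : Int) - (r : Int)) (by omega : N ≠ 0)
    have h2 := Int.emod_lt_of_pos ((c : Int) - (r : Int)) hN
    omega
  have hbump := foldl_bump_getD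
    (fun c : Nat => (PySem.Int.mod ((c : Int) - (r : Int)) N).toNat)
    (fun c : Nat => get2 A (r : Int) (c : Int)) d (List.range N.toNat) dg
    (hlen ▸ hd) (fun c _ => hidx c)
  beta_reduce at hbump
  have hfilt : (List.range N.toNat).filter
      (fun c : Nat => (PySem.Int.mod ((c : Int) - (r : Int)) N).toNat == d)
      = [(((d : Int) + (r : Int)) % N).toNat] := by
    apply filter_range_eq_singleton _ _ _ (by omega)
    intro c hc
    have hclt : (c : Int) < N := by omega
    have hiff1 := idx_eq_iff N (r : Int) (d : Int)
      (by exact_mod_cast Nat.zero_le d) (by omega) (c : Int)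
      (by exact_mod_cast Nat.zero_le c) hclt
    have hiff2 := idx_eq_iff N (r : Int) (d : Int)
      (by exact_mod_cast Nat.zero_le d) (by omega)
      (((d : Int) + (r : Int)) % N) hc0nn hc0lt
    rw [hmodeq c]
    simp only [beq_iff_eq]
    constructor
    · intro h
      have hnn : 0 ≤ ((c : Int) - (r : Int)) % N := Int.emod_nonneg _ (by omega)
      have h1 : ((c : Int) - (r : Int)) % N = (d : Int) := by omega
      have h2 := hiff1.mp h1
      omega
    · intro h
      subst h
      have hcast : (((((d : Int) + (r : Int)) % N).toNat : Nat) : Int)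
          = ((d : Int) + (r : Int)) % N := Int.toNat_of_nonneg hc0nn
      rw [hcast]
      have h1 : (((d : Int) + (r : Int)) % N - (r : Int)) % N = (d : Int) := hiff2.mpr rfl
      omega
  unfold bumpRow
  rw [hbump, hfilt]
  simp [Int.toNat_of_nonneg hc0nn]

-- B's diag bins hold the diagonal sums
lemma diag_getD (A : List (List Int)) (N : Int) (hN : 0 < N) (d : Nat) (hd : d < N.toNat) :
    ∀ (L : List Nat) (dg : List Int), dg.length = N.toNat →
      ((L.foldl (fun dg r => bumpRow A N r dg) dg).getD d 0)
        = dg.getD d 0 + (L.map (fun (r : Nat) => get2 A (r : Int) (((d : Int) + (r : Int)) % N))).sum := by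
  intro L
  induction L with
  | nil => intro dg _; simp
  | cons r L ih =>
    intro dg hlen
    rw [List.foldl_cons, ih _ (by rw [bumpRow_length, hlen]),
      bumpRow_getD A N hN r d hd dg hlen]
    simp
    ring

-- list-range sums as Finset sums
lemma sum_map_range_eq (n : Nat) (f : Nat → Int) :
    ((List.range n).map f).sum = ∑ i ∈ Finset.range n, f i := by
  induction n with
  | zero => simp
  | succ k ih =>
    rw [List.range_succ, List.map_append, List.sum_append, Finset.sum_range_succ, ih]
    simp

-- A's fold rewritten with the canonical diagonal sums
lemma solve_eq (N : Int) (A : List (List Int)) (hN : 0 < N) :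
    solve N A = (List.range N.toNat).foldl
      (fun res (c : Nat) => min res (N + (A.map (fun row => row.foldl (· + ·) 0)).foldl (· + ·) 0
        - 2 * ∑ j ∈ Finset.range N.toNat, get2 A (j : Int) (((c : Int) + j) % N)))
      (N * N) := by
  have hunf : solve N A = (List.range N.toNat).foldl
      (fun res c => min res (N + (A.map (fun row => row.foldl (· + ·) 0)).foldl (· + ·) 0
        - 2 * solveInner A N N.toNat 0 0 (Int.ofNat c)))
      (N * N) := rfl
  rw [hunf]
  apply PySem.List.foldl_congr_mem
  intro acc c hc
  have hcN : c < N.toNat := List.mem_range.mp hc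
  have h1 : solveInner A N N.toNat 0 0 (Int.ofNat c)
      = 0 + ∑ j ∈ Finset.range N.toNat, get2 A (((0 : Int) + (j : Int)) % N) (((c : Int) + j) % N) := by
    have := solveInner_eq A N hN N.toNat 0 0 (Int.ofNat c)
      (by simp) (by
        simp only [Int.ofNat_eq_natCast]
        exact Int.emod_eq_of_lt (by exact_mod_cast Nat.zero_le c) (by omega))
    simpa using this
  rw [h1, zero_add]
  congr 2
  congr 1
  apply Finset.sum_congr rfl
  intro j hj
  have hjN : j < N.toNat := Finset.mem_range.mp hj
  congr 1
  rw [zero_add]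
  exact Int.emod_eq_of_lt (by exact_mod_cast Nat.zero_le j) (by omega)

-- B's fold rewritten with the canonical diagonal sums
lemma solve_alt_eq (N : Int) (A : List (List Int)) (hN : 0 < N) :
    solve_alt N A = (List.range N.toNat).foldl
      (fun res (d : Nat) => min res (N + (A.map (fun row => row.foldl (· + ·) 0)).foldl (· + ·) 0
        - 2 * ∑ j ∈ Finset.range N.toNat, get2 A (j : Int) (((d : Int) + j) % N)))
      (N * N) := by
  have hunf : solve_alt N A = (List.range N.toNat).foldl
      (fun res d => min res (N + (A.map (fun row => row.foldl (· + ·) 0)).foldl (· + ·) 0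
        - 2 * ((List.range N.toNat).foldl (fun dg r => bumpRow A N r dg)
            (List.replicate N.toNat (0 : Int))).getD d 0))
      (N * N) := rfl
  rw [hunf]
  apply PySem.List.foldl_congr_mem
  intro acc d hd
  have hdN : d < N.toNat := List.mem_range.mp hd
  have hdiag : (((List.range N.toNat).foldl (fun dg r => bumpRow A N r dg)
      (List.replicate N.toNat (0 : Int))).getD d 0)
      = ∑ j ∈ Finset.range N.toNat, get2 A (j : Int) (((d : Int) + j) % N) := by
    rw [diag_getD A N hN d hdN _ _ (by simp)]
    have hrep : (List.replicate N.toNat (0 : Int)).getD d 0 = 0 := by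
      simp [List.getD_eq_getElem?_getD]
    rw [hrep, zero_add, sum_map_range_eq]
  rw [hdiag]

-- ===== VERDICT (by name: the statement is the Claim_ definition above) =====
theorem solve_spec : Claim_equal_solve := by
  intro N A hdom hpre
  unfold Spec_solve
  by_cases hN : 0 < N
  · rw [solve_eq N A hN, solve_alt_eq N A hN]
  · have h0 : N.toNat = 0 := by omega
    simp [solve, solve_alt, h0]
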